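-- pv_equiv track=rewrite | github.com/arskqz/project-vesi | main.py | calculate_mood
-- ===== SOURCE A (Python) =====
-- TSUN_WORDS = {
--     # originals
--     "baka", "hmph", "stupid", "dummy",
--
--     # direct insults
--     "idiot", "moron", "dumb", "dense", "pathetic", "loser",
--     "jerk", "creep", "weirdo", "annoying", "hopeless", "ridiculous",
--     "useless", "lame", "gross", "clueless", "airhead",
--
--     # tsundere attitude
--     "tch", "hm", "huh", "whatever", "fine", "jeez", "sheesh",
--     "ugh", "eh", "meh",
--
--     # dismissive / bratty
--     "shut", "go", "away", "leave", "quit", "stop", "forget",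
--     "dream", "wish", "like", "care",
--
--     # cold/embarrassed reactions
--     "embarrassing", "awkward", "weird", "pervert", "creepy",
--     "sigh", "tsk", "bother", "troublesome",
--
--     # classic anime romcom flavor
--     "perv", "dork", "nerd", "geez", "seriously", "unbelievable",
--     "ridiculous", "absurd",
--
--     # tougher/aggressive spice
--     "fight", "stare", "glare", "hurry", "move", "slow", "late",
--     "brat", "punk"
-- }
--
-- DRIFT_WORDS = {
--     # assistant identity (VERY strong signals)
--     "assistant", "ai", "model", "system",
--
--     # apologies
--     "apologize", "apologies", "regret",
--
--     # customer-support verbs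
--     "assist", "assistance", "support", "provide",
--
--     # service phrasing words
--     "happy", "glad", "certainly",
--
--     # compliance / limitation speak
--     "limitation", "policy", "guidelines",
--
--     # guidance tone
--     "suggest", "recommend", "advise", "clarify", "explain",
--
--     # soft corporate empathy
--     "understand", "appreciate"
-- }
--
-- def calculate_mood(text, current_score):
--     """Calculates mood score based on response"""
--     score = current_score
--     tokens = set(text.lower().split())
--
--     for word in tokens:
--         if word in TSUN_WORDS:
--             score += 10
--         elif word in DRIFT_WORDS:
--             score -= 15
--
--     return max(0, min(100, score))
-- ===== SOURCE B (Python) =====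
-- # Weight table over the fixed vocabulary: scan the vocabulary once and add each
-- # word's delta if it occurs in the text; no token set and no per-token branching.
-- WEIGHTS = [
--     ("baka", 10), ("hmph", 10), ("stupid", 10), ("dummy", 10),
--     ("idiot", 10), ("moron", 10), ("dumb", 10), ("dense", 10), ("pathetic", 10), ("loser", 10),
--     ("jerk", 10), ("creep", 10), ("weirdo", 10), ("annoying", 10), ("hopeless", 10), ("ridiculous", 10),
--     ("useless", 10), ("lame", 10), ("gross", 10), ("clueless", 10), ("airhead", 10),
--     ("tch", 10), ("hm", 10), ("huh", 10), ("whatever", 10), ("fine", 10), ("jeez", 10), ("sheesh", 10),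
--     ("ugh", 10), ("eh", 10), ("meh", 10),
--     ("shut", 10), ("go", 10), ("away", 10), ("leave", 10), ("quit", 10), ("stop", 10), ("forget", 10),
--     ("dream", 10), ("wish", 10), ("like", 10), ("care", 10),
--     ("embarrassing", 10), ("awkward", 10), ("weird", 10), ("pervert", 10), ("creepy", 10),
--     ("sigh", 10), ("tsk", 10), ("bother", 10), ("troublesome", 10),
--     ("perv", 10), ("dork", 10), ("nerd", 10), ("geez", 10), ("seriously", 10), ("unbelievable", 10),
--     ("absurd", 10),
--     ("fight", 10), ("stare", 10), ("glare", 10), ("hurry", 10), ("move", 10), ("slow", 10), ("late", 10),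
--     ("brat", 10), ("punk", 10),
--     ("assistant", -15), ("ai", -15), ("model", -15), ("system", -15),
--     ("apologize", -15), ("apologies", -15), ("regret", -15),
--     ("assist", -15), ("assistance", -15), ("support", -15), ("provide", -15),
--     ("happy", -15), ("glad", -15), ("certainly", -15),
--     ("limitation", -15), ("policy", -15), ("guidelines", -15),
--     ("suggest", -15), ("recommend", -15), ("advise", -15), ("clarify", -15), ("explain", -15),
--     ("understand", -15), ("appreciate", -15),
-- ]
--
-- def calculate_mood(text, current_score):
--     """Calculates mood score based on response"""
--     tokens = text.lower().split()
--     delta = sum(d for w, d in WEIGHTS if w in tokens)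
--     return max(0, min(100, current_score + delta))
-- ===== Notes on version B (the rewrite author's own statement) =====
-- stated objective: alternative
-- what changed: Inverts the traversal: instead of deduplicating the tokens into a set and classifying each token with an elif chain, B scans a single precomputed (word, delta) weight table over the fixed vocabulary and adds each delta whose word occurs in the raw token list; correct because the table's words are distinct and the two word groups are disjoint.
import Mathlib
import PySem

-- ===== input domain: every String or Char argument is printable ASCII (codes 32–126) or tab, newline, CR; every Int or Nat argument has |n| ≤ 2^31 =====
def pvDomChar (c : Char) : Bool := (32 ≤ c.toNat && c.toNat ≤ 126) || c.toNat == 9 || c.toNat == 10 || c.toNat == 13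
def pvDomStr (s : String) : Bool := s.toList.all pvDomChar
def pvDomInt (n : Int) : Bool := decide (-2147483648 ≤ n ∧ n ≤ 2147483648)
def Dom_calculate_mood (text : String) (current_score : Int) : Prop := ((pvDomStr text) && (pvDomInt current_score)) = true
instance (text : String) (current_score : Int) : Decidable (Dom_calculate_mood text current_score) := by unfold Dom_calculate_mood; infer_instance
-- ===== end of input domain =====

set_option maxRecDepth 8000


-- B inverts the traversal: one precomputed (word, delta) weight table is scanned over the
-- fixed vocabulary, each delta added when its word occurs among the text's tokens — no token
-- set and no elif branching (alternative decomposition; same result since the vocabulary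
-- entries are distinct and the two word groups are disjoint).

-- ===== PORT A =====
def TSUN_WORDS : PySem.Set String := PySem.Set.ofList
  ["baka", "hmph", "stupid", "dummy",
   "idiot", "moron", "dumb", "dense", "pathetic", "loser",
   "jerk", "creep", "weirdo", "annoying", "hopeless", "ridiculous",
   "useless", "lame", "gross", "clueless", "airhead",
   "tch", "hm", "huh", "whatever", "fine", "jeez", "sheesh",
   "ugh", "eh", "meh",
   "shut", "go", "away", "leave", "quit", "stop", "forget",
   "dream", "wish", "like", "care",
   "embarrassing", "awkward", "weird", "pervert", "creepy",
   "sigh", "tsk", "bother", "troublesome",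
   "perv", "dork", "nerd", "geez", "seriously", "unbelievable",
   "ridiculous", "absurd",
   "fight", "stare", "glare", "hurry", "move", "slow", "late",
   "brat", "punk"]

def DRIFT_WORDS : PySem.Set String := PySem.Set.ofList
  ["assistant", "ai", "model", "system",
   "apologize", "apologies", "regret",
   "assist", "assistance", "support", "provide",
   "happy", "glad", "certainly",
   "limitation", "policy", "guidelines",
   "suggest", "recommend", "advise", "clarify", "explain",
   "understand", "appreciate"]

def calculate_mood (text : String) (current_score : Int) : Int :=
  let tokens : PySem.Set String := PySem.Set.ofList (PySem.Str.split₀ (PySem.Str.lower text))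
  let score : Int := tokens.foldl (fun s w =>
      if PySem.Set.contains TSUN_WORDS w then s + 10
      else if PySem.Set.contains DRIFT_WORDS w then s - 15
      else s) current_score
  max 0 (min 100 score)

-- ===== PORT B =====
def WEIGHTS : List (String × Int) :=
  [("baka", 10), ("hmph", 10), ("stupid", 10), ("dummy", 10),
   ("idiot", 10), ("moron", 10), ("dumb", 10), ("dense", 10), ("pathetic", 10), ("loser", 10),
   ("jerk", 10), ("creep", 10), ("weirdo", 10), ("annoying", 10), ("hopeless", 10), ("ridiculous", 10),
   ("useless", 10), ("lame", 10), ("gross", 10), ("clueless", 10), ("airhead", 10),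
   ("tch", 10), ("hm", 10), ("huh", 10), ("whatever", 10), ("fine", 10), ("jeez", 10), ("sheesh", 10),
   ("ugh", 10), ("eh", 10), ("meh", 10),
   ("shut", 10), ("go", 10), ("away", 10), ("leave", 10), ("quit", 10), ("stop", 10), ("forget", 10),
   ("dream", 10), ("wish", 10), ("like", 10), ("care", 10),
   ("embarrassing", 10), ("awkward", 10), ("weird", 10), ("pervert", 10), ("creepy", 10),
   ("sigh", 10), ("tsk", 10), ("bother", 10), ("troublesome", 10),
   ("perv", 10), ("dork", 10), ("nerd", 10), ("geez", 10), ("seriously", 10), ("unbelievable", 10),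
   ("absurd", 10),
   ("fight", 10), ("stare", 10), ("glare", 10), ("hurry", 10), ("move", 10), ("slow", 10), ("late", 10),
   ("brat", 10), ("punk", 10),
   ("assistant", -15), ("ai", -15), ("model", -15), ("system", -15),
   ("apologize", -15), ("apologies", -15), ("regret", -15),
   ("assist", -15), ("assistance", -15), ("support", -15), ("provide", -15),
   ("happy", -15), ("glad", -15), ("certainly", -15),
   ("limitation", -15), ("policy", -15), ("guidelines", -15),
   ("suggest", -15), ("recommend", -15), ("advise", -15), ("clarify", -15), ("explain", -15),
   ("understand", -15), ("appreciate", -15)]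

def calculate_mood_alt (text : String) (current_score : Int) : Int :=
  let tokens : List String := PySem.Str.split₀ (PySem.Str.lower text)
  let delta : Int := ((WEIGHTS.filter (fun p => decide (p.1 ∈ tokens))).map (fun p => p.2)).sum
  max 0 (min 100 (current_score + delta))

-- ===== PRECONDITION & SPEC =====
def Spec_calculate_mood (text : String) (current_score : Int) (out : Int) : Prop := out = calculate_mood_alt text current_score
instance (text : String) (current_score : Int) (out : Int) : Decidable (Spec_calculate_mood text current_score out) := by unfold Spec_calculate_mood; infer_instance

-- ===== CLAIM (what is proved, stated in full; the proofs are below) =====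
def Claim_equal_calculate_mood : Prop := ∀ (text : String) (current_score : Int), Dom_calculate_mood text current_score → Spec_calculate_mood text current_score (calculate_mood text current_score)

-- ===== LEMMAS AND PROOFS =====

theorem tsun_drift_disjoint (w : String) (h : w ∈ TSUN_WORDS) : w ∉ DRIFT_WORDS := by
  have hd : PySem.Set.isdisjoint TSUN_WORDS DRIFT_WORDS = true := by decide
  exact (PySem.Set.isdisjoint_iff _ _).mp hd w h

-- A's per-token loop counts +10 per tsundere token and -15 per drift token (sets are disjoint).
theorem mood_fold_eq (l : List String) (cs : Int) :
    l.foldl (fun s w =>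
      if PySem.Set.contains TSUN_WORDS w then s + 10
      else if PySem.Set.contains DRIFT_WORDS w then s - 15
      else s) cs
    = cs + 10 * ((l.filter (fun w => PySem.Set.contains TSUN_WORDS w)).length : Int)
         - 15 * ((l.filter (fun w => PySem.Set.contains DRIFT_WORDS w)).length : Int) := by
  induction l generalizing cs with
  | nil => simp
  | cons w t ih =>
    simp only [List.foldl_cons, List.filter_cons]
    by_cases hT : w ∈ TSUN_WORDS
    · have hD := tsun_drift_disjoint w hT
      rw [ih]; simp [hT, hD]; ring
    · by_cases hD : w ∈ DRIFT_WORDS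
      · rw [ih]; simp [hT, hD]; ring
      · rw [ih]; simp [hT, hD]

-- the weight table is the tsundere vocabulary at +10 followed by the drift vocabulary at -15
theorem weights_eq :
    WEIGHTS = TSUN_WORDS.map (fun w => (w, (10 : Int))) ++ DRIFT_WORDS.map (fun w => (w, (-15 : Int))) := by
  decide

-- filtering a constant-weight block and summing is weight × (number of vocabulary words present)
theorem sum_weight_block {t : List String} (l : List String) (c : Int) :
    (((l.map (fun w => (w, c))).filter (fun p => decide (p.1 ∈ t))).map (fun p => p.2)).sum
      = c * ((l.filter (fun w => decide (w ∈ t))).length : Int) := by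
  induction l with
  | nil => simp
  | cons w r ih =>
    by_cases h : w ∈ t
    · simp [h, ih]; ring
    · simp [h, ih]

-- counting a's elements in b equals counting b's elements in a, for duplicate-free lists
theorem length_filter_mem_comm {α : Type} [DecidableEq α] (a b : List α) (ha : a.Nodup) (hb : b.Nodup) :
    (a.filter (fun x => decide (x ∈ b))).length = (b.filter (fun x => decide (x ∈ a))).length := by
  rw [← List.toFinset_card_of_nodup (ha.filter _), ← List.toFinset_card_of_nodup (hb.filter _)]
  rw [List.toFinset_filter, List.toFinset_filter]
  have h1 : a.toFinset.filter (fun x => decide (x ∈ b) = true) = a.toFinset ∩ b.toFinset := by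
    apply Finset.ext; intro x; simp
  have h2 : b.toFinset.filter (fun x => decide (x ∈ a) = true) = b.toFinset ∩ a.toFinset := by
    apply Finset.ext; intro x; simp
  rw [h1, h2, Finset.inter_comm]

-- the two counting directions agree: vocabulary words among raw tokens vs distinct tokens in the vocabulary
theorem count_swap (voc : List String) (hv : voc.Nodup) (toks : List String) :
    (voc.filter (fun w => decide (w ∈ toks))).length
      = ((PySem.Set.ofList toks).filter (fun w => PySem.Set.contains voc w)).length := by
  have h1 : (voc.filter (fun w => decide (w ∈ toks))).length
      = (voc.filter (fun w => decide (w ∈ PySem.Set.ofList toks))).length := by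
    congr 1; apply List.filter_congr; intro x _
    simp [PySem.Set.mem_ofList]
  rw [h1, length_filter_mem_comm voc (PySem.Set.ofList toks) hv (PySem.Set.nodup_ofList toks)]
  congr 1; apply List.filter_congr; intro x _
  simp [PySem.Set.contains]

-- ===== VERDICT (by name: the statement is the Claim_ definition above) =====
theorem calculate_mood_spec : Claim_equal_calculate_mood := by
  intro text current_score _
  unfold Spec_calculate_mood calculate_mood calculate_mood_alt
  simp only [mood_fold_eq, weights_eq, List.filter_append, List.map_append, List.sum_append,
    sum_weight_block]
  rw [count_swap TSUN_WORDS (by decide) _, count_swap DRIFT_WORDS (by decide) _]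
  ring_nf
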